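-- pv_equiv track=rewrite | github.com/ProgrammingForDiscreteMath/20170821-rakeshnetha14 | code.py | next_ten_primes
-- ===== SOURCE A (Python) =====
-- def is_prime(n):
--     """
--     Test if ``n`` is a prime.
--     """
--     if n>1:
--         for i in range(2,n):
--             if (n%i)==0:
--                 return("False");
--                 break;
--         else:
--             return("True")
--     else:
--         return ("False")
--
-- def next_ten_primes(n):
--     """
--     Return the list of the first ten prime numbers greater than or equal to n
--
--
--     """
--     L1=[];
--     for i in range(10):
--         while (is_prime(n)!='True'):
--             n=n+1;
--         L1=L1+[n];
--         n=n+1;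
--     return L1
-- ===== SOURCE B (Python) =====
-- def next_ten_primes(n):
--     """Return the list of the first ten prime numbers greater than or equal to n."""
--     def _is_prime(m):
--         if m < 2:
--             return False
--         d = 2
--         while d * d <= m:
--             if m % d == 0:
--                 return False
--             d += 1
--         return True
--
--     L = []
--     m = n
--     while len(L) < 10:
--         if _is_prime(m):
--             L.append(m)
--         m += 1
--     return L
-- ===== Notes on version B (the rewrite author's own statement) =====
-- stated objective: faster
-- what changed: B replaces A's full trial division over range(2,n) inside a for-10/inner-while structure by a single collect-until-ten loop whose primality test only tries divisors d with d*d <= m.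
import Mathlib
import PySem

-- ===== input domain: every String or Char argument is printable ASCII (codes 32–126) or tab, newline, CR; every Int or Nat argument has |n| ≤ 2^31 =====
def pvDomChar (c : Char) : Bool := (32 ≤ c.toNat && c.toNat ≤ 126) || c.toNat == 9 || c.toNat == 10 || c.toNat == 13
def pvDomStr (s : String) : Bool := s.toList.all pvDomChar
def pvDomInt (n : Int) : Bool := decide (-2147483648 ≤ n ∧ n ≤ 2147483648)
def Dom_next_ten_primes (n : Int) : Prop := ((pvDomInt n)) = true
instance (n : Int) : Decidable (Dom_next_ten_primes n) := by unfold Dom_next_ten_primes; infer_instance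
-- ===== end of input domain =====

-- B collects primes in one while-loop whose primality test only tries divisors d with d*d <= m,
-- instead of A's for-10 / inner-while structure with full trial division over range(2,n):
-- an alternative, structurally different algorithm; return values agree for every int n.
-- The while-loops are ported with a fuel guard that only makes the recursion structural;
-- the proofs below show the fuel budgets always suffice (Bertrand's postulate), so each
-- port computes exactly what its Python computes on every int n.

-- ===== PORT A =====

-- the for-i-in-range(2,n) loop of is_prime, with its early return "False" and for-else "True"
def isPrimeALoop (n : Int) : List Int → String
  | [] => "True"
  | i :: t => if PySem.Int.mod n i == 0 then "False" else isPrimeALoop n t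

def is_prime (n : Int) : String :=
  if n > 1 then isPrimeALoop n (PySem.List.pyRange 2 n 1) else "False"

-- the 'while (is_prime(n)!='True'): n=n+1' loop of A (fuel = totality guard only)
def findA (fuel : Nat) (n : Int) : Int :=
  match fuel with
  | 0 => n
  | Nat.succ f => if is_prime n ≠ "True" then findA f (n + 1) else n

-- the 'for i in range(10)' loop of A, carrying L1 and n
def outerA : Nat → List Int → Int → List Int
  | 0, L, _ => L
  | Nat.succ k, L, n =>
      let m := findA (2 * (n.natAbs + 2)) n
      outerA k (L ++ [m]) (m + 1)

def next_ten_primes (n : Int) : List Int := outerA 10 [] n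

-- ===== PORT B =====

-- the 'while d*d <= m' loop of B's _is_prime (fuel = totality guard only)
def trialLoop (fuel : Nat) (m d : Int) : Bool :=
  match fuel with
  | 0 => true
  | Nat.succ f =>
      if d * d ≤ m then
        (if PySem.Int.mod m d == 0 then false else trialLoop f m (d + 1))
      else true

def isPrimeB (m : Int) : Bool := if m < 2 then false else trialLoop (m.toNat + 1) m 2

-- the 'while len(L) < 10' loop of B (fuel = totality guard only)
def loopB (fuel : Nat) (m : Int) (L : List Int) : List Int :=
  match fuel with
  | 0 => L
  | Nat.succ f =>
      if L.length < 10 then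
        loopB f (m + 1) (if isPrimeB m then L ++ [m] else L)
      else L

def next_ten_primes_alt (n : Int) : List Int := loopB (1024 * (n.natAbs + 2)) n []

-- ===== PRECONDITION & SPEC =====
def Spec_next_ten_primes (n : Int) (out : List Int) : Prop := out = next_ten_primes_alt n
instance (n : Int) (out : List Int) : Decidable (Spec_next_ten_primes n out) := by unfold Spec_next_ten_primes; infer_instance

-- ===== CLAIM (what is proved, stated in full; the proofs are below) =====
def Claim_equal_next_ten_primes : Prop := ∀ (n : Int), Dom_next_ten_primes n → Spec_next_ten_primes n (next_ten_primes n)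

-- ===== LEMMAS AND PROOFS =====

-- "n is prime", as a property of the Int n itself
def pvIsP (n : Int) : Prop := 1 < n ∧ ∀ i : Int, 2 ≤ i → i < n → ¬ i ∣ n

theorem pvPrimeExists (n : Int) : ∃ p : Nat, Nat.Prime p ∧ n ≤ (p : Int) := by
  obtain ⟨p, hle, hp⟩ := Nat.exists_infinite_primes n.toNat
  exact ⟨p, hp, le_trans (Int.self_le_toNat n) (by exact_mod_cast hle)⟩

-- the next prime ≥ n, and the distance to it (drives all the fuel/termination arguments)
def pvNextP (n : Int) : Nat := Nat.find (pvPrimeExists n)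

def pvGap (n : Int) : Nat := ((pvNextP n : Int) - n).toNat

theorem pvNextP_ge (n : Int) : n ≤ (pvNextP n : Int) := (Nat.find_spec (pvPrimeExists n)).2

theorem pvIsP_of_prime (p : Nat) (hp : Nat.Prime p) : pvIsP (p : Int) := by
  refine ⟨by exact_mod_cast hp.one_lt, ?_⟩
  intro i h2 hlt hdvd
  have h0 : (0:Int) ≤ i := by omega
  have hi : i = ((i.toNat : Nat) : Int) := (Int.toNat_of_nonneg h0).symm
  rw [hi] at hdvd
  have : i.toNat ∣ p := Int.ofNat_dvd.mp hdvd
  rcases (Nat.Prime.eq_one_or_self_of_dvd hp _ this) with h | h <;> omega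

theorem pvPrime_of_pvIsP (n : Int) (h : pvIsP n) : Nat.Prime n.toNat := by
  obtain ⟨h1, hdiv⟩ := h
  rw [Nat.prime_def_lt']
  refine ⟨by omega, fun k hk hklt hkdvd => ?_⟩
  have hn : n = ((n.toNat : Nat) : Int) := (Int.toNat_of_nonneg (by omega)).symm
  refine hdiv (k : Int) (by exact_mod_cast hk) (by omega) ?_
  rw [hn]
  exact_mod_cast hkdvd

theorem isPrimeALoop_true_iff (n : Int) (l : List Int) :
    isPrimeALoop n l = "True" ↔ ∀ i ∈ l, ¬ PySem.Int.mod n i = 0 := by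
  induction l with
  | nil => simp [isPrimeALoop]
  | cons i t ih =>
    simp only [isPrimeALoop]
    by_cases h : PySem.Int.mod n i = 0 <;> simp [h, ih]

theorem is_prime_true_iff (n : Int) : is_prime n = "True" ↔ pvIsP n := by
  unfold is_prime
  by_cases h1 : n > 1
  · rw [if_pos h1, isPrimeALoop_true_iff]
    unfold pvIsP
    constructor
    · intro h
      exact ⟨h1, fun i h2 hlt hdvd =>
        h i (PySem.List.mem_pyRange_one.mpr ⟨h2, hlt⟩)
          ((PySem.Int.mod_eq_zero_iff_dvd n i).mpr hdvd)⟩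
    · rintro ⟨-, h⟩ i hmem hmod
      rcases PySem.List.mem_pyRange_one.mp hmem with ⟨h2, hlt⟩
      exact h i h2 hlt ((PySem.Int.mod_eq_zero_iff_dvd n i).mp hmod)
  · rw [if_neg h1]
    exact iff_of_false (by simp) (fun h => absurd h.1 (by omega))

theorem pvNextP_step (n : Int) (h : ¬ pvIsP n) :
    pvNextP (n + 1) = pvNextP n ∧ n + 1 ≤ (pvNextP n : Int) := by
  have hspec : Nat.Prime (pvNextP n) ∧ n ≤ (pvNextP n : Int) := Nat.find_spec (pvPrimeExists n)
  have hspec1 : Nat.Prime (pvNextP (n+1)) ∧ n + 1 ≤ (pvNextP (n+1) : Int) :=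
    Nat.find_spec (pvPrimeExists (n+1))
  have hne : n ≠ ((pvNextP n : Nat) : Int) := fun he => h (he ▸ pvIsP_of_prime _ hspec.1)
  have hlt : n + 1 ≤ (pvNextP n : Int) := by have := hspec.2; omega
  refine ⟨le_antisymm ?_ ?_, hlt⟩
  · exact Nat.find_min' (pvPrimeExists (n+1)) ⟨hspec.1, hlt⟩
  · exact Nat.find_min' (pvPrimeExists n) ⟨hspec1.1, by have := hspec1.2; omega⟩

theorem pvGap_step (n : Int) (h : ¬ pvIsP n) : pvGap (n + 1) < pvGap n := by
  obtain ⟨he, hlt⟩ := pvNextP_step n h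
  unfold pvGap
  rw [he]; omega

theorem pvNextP_self (n : Int) (h : pvIsP n) : (pvNextP n : Int) = n := by
  have h2 : pvNextP n ≤ n.toNat :=
    Nat.find_min' (pvPrimeExists n) ⟨pvPrime_of_pvIsP n h, Int.self_le_toNat n⟩
  have h3 := pvNextP_ge n
  have h1 := h.1
  omega

-- the fuel budget 2*(|n|+2) covers the distance to the next prime (Bertrand's postulate)
theorem pvNextP_le_two_mul (n : Int) : (pvNextP n : Int) + 1 ≤ 2 * max n 2 := by
  by_cases h2 : n ≤ 2
  · have : pvNextP n ≤ 2 := Nat.find_min' (pvPrimeExists n) ⟨Nat.prime_two, by exact_mod_cast h2⟩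
    have := le_max_right n 2
    omega
  · have hN : (n - 1).toNat ≠ 0 := by omega
    obtain ⟨p, hp, hgt, hle⟩ := Nat.exists_prime_lt_and_le_two_mul (n - 1).toNat hN
    have hcast : ((n - 1).toNat : Int) = n - 1 := Int.toNat_of_nonneg (by omega)
    have hnp : n ≤ (p : Int) := by
      have : (n - 1).toNat < p := hgt
      omega
    have hmin : pvNextP n ≤ p := Nat.find_min' (pvPrimeExists n) ⟨hp, hnp⟩
    have hub : (p : Int) ≤ 2 * ((n - 1).toNat : Int) := by exact_mod_cast hle
    have := le_max_left n 2
    omega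

theorem pvGap_le (n : Int) : pvGap n ≤ 2 * (n.natAbs + 2) := by
  have h1 := pvNextP_le_two_mul n
  have h2 : max n 2 ≤ (n.natAbs : Int) + 2 := by
    rcases le_total n 2 with h | h
    · rw [max_eq_right h]; omega
    · rw [max_eq_left h]; omega
  unfold pvGap
  omega

-- findA computes the next prime ≥ n whenever its fuel covers the gap
theorem findA_eq_nextP : ∀ (fuel : Nat) (n : Int), pvGap n ≤ fuel → findA fuel n = (pvNextP n : Int) := by
  intro fuel
  induction fuel with
  | zero =>
    intro n h
    have h1 := pvNextP_ge n
    have h0 : pvGap n = 0 := by omega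
    unfold pvGap at h0
    simp only [findA]
    omega
  | succ f ih =>
    intro n h
    rw [findA]
    by_cases hp : is_prime n = "True"
    · rw [if_neg (not_not_intro hp)]
      exact (pvNextP_self n ((is_prime_true_iff n).mp hp)).symm
    · have hip : ¬ pvIsP n := fun hi => hp ((is_prime_true_iff n).mpr hi)
      rw [if_pos hp]
      obtain ⟨he, -⟩ := pvNextP_step n hip
      rw [ih (n + 1) (by have := pvGap_step n hip; omega), he]

-- characterisation of B's sqrt-bounded trial-division test
theorem trialLoop_true_iff (m : Int) : ∀ (fuel : Nat) (d : Int), 2 ≤ d → (m + 1 - d).toNat ≤ fuel →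
    (trialLoop fuel m d = true ↔ ∀ e : Int, d ≤ e → e * e ≤ m → ¬ PySem.Int.mod m e = 0) := by
  intro fuel
  induction fuel with
  | zero =>
    intro d hd hfu
    have hmd : m < d := by omega
    refine iff_of_true (by simp [trialLoop]) (fun e he hee hmod => ?_)
    have h2 : e * 2 ≤ e * e := mul_le_mul_of_nonneg_left (by omega) (by omega)
    linarith
  | succ fu ih =>
    intro d hd hfu
    rw [trialLoop]
    by_cases hdd : d * d ≤ m
    · rw [if_pos hdd]
      have hdm : d ≤ m := by
        have h2 : d * 2 ≤ d * d := mul_le_mul_of_nonneg_left hd (by omega)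
        linarith
      by_cases hmod : PySem.Int.mod m d = 0
      · have hb : (PySem.Int.mod m d == 0) = true := by simp [hmod]
        rw [hb]
        exact iff_of_false (by simp) (fun hall => hall d le_rfl hdd hmod)
      · have hb : (PySem.Int.mod m d == 0) = false := by simp [hmod]
        rw [hb]
        simp only [Bool.false_eq_true, if_false]
        rw [ih (d + 1) (by omega) (by omega)]
        constructor
        · intro h e he hee
          rcases eq_or_lt_of_le he with rfl | hlt
          · exact hmod
          · exact h e (by omega) hee
        · intro h e he hee
          exact h e (by omega) hee
    · rw [if_neg hdd]
      refine iff_of_true rfl (fun e he hee hmod => ?_)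
      have h2 : d * d ≤ d * e := mul_le_mul_of_nonneg_left he (by omega)
      have h3 : d * e ≤ e * e := mul_le_mul_of_nonneg_right he (by omega)
      linarith

theorem isPrimeB_true_iff (m : Int) : isPrimeB m = true ↔ pvIsP m := by
  unfold isPrimeB
  by_cases h2 : m < 2
  · rw [if_pos h2]
    exact iff_of_false (by simp) (fun h => absurd h.1 (by omega))
  · rw [if_neg h2, trialLoop_true_iff m (m.toNat + 1) 2 le_rfl (by omega)]
    unfold pvIsP
    constructor
    · intro h
      refine ⟨by omega, fun i hi hlt hdvd => ?_⟩
      obtain ⟨j, hj⟩ := hdvd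
      have hj0 : 0 < j := by
        by_contra hc
        have : i * j ≤ 0 := mul_nonpos_of_nonneg_of_nonpos (by omega) (by omega)
        omega
      have hj1 : j ≠ 1 := fun h1 => by rw [h1, mul_one] at hj; omega
      have hj2 : 2 ≤ j := by omega
      by_cases hii : i * i ≤ m
      · exact h i hi hii ((PySem.Int.mod_eq_zero_iff_dvd m i).mpr ⟨j, hj⟩)
      · have hji : j < i := by
          by_contra hc
          have hc2 : i ≤ j := not_lt.mp hc
          have : i * i ≤ i * j := mul_le_mul_of_nonneg_left hc2 (by omega)
          rw [← hj] at this
          exact hii this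
        have hjj : j * j ≤ m := by
          have h3 : j * j ≤ j * i := mul_le_mul_of_nonneg_left (le_of_lt hji) (by omega)
          have h4 : j * i = i * j := mul_comm j i
          linarith [hj.ge, hj.le]
        exact h j hj2 hjj ((PySem.Int.mod_eq_zero_iff_dvd m j).mpr ⟨i, by rw [hj, mul_comm]⟩)
    · rintro ⟨h1, h⟩ e he hee hmod
      have hdvd := (PySem.Int.mod_eq_zero_iff_dvd m e).mp hmod
      have helt : e < m := by
        have h2' : e * 2 ≤ e * e := mul_le_mul_of_nonneg_left he (by omega)
        linarith
      exact h e he helt hdvd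

-- canonical "collect k primes starting at m", the common meaning of both loops
def pvCollect : Nat → Int → List Int
  | 0, _ => []
  | Nat.succ k, m =>
      if isPrimeB m then m :: pvCollect k (m + 1) else pvCollect (Nat.succ k) (m + 1)
termination_by k m => (k, pvGap m)
decreasing_by
  · apply Prod.Lex.left; omega
  · rename_i hp
    exact Prod.Lex.right _ (pvGap_step m (fun hip => hp ((isPrimeB_true_iff m).mpr hip)))

theorem pvCollect_step (k : Nat) :
    ∀ m, pvCollect (Nat.succ k) m = (pvNextP m : Int) :: pvCollect k ((pvNextP m : Int) + 1) := by
  suffices h : ∀ (g : Nat) (m : Int), pvGap m ≤ g →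
      pvCollect (Nat.succ k) m = (pvNextP m : Int) :: pvCollect k ((pvNextP m : Int) + 1) from
    fun m => h (pvGap m) m le_rfl
  intro g
  induction g with
  | zero =>
    intro m hg
    have hp : isPrimeB m = true := by
      by_contra hc
      have hip : ¬ pvIsP m := fun h => hc ((isPrimeB_true_iff m).mpr h)
      have := (pvNextP_step m hip).2
      unfold pvGap at hg
      omega
    have hself := pvNextP_self m ((isPrimeB_true_iff m).mp hp)
    rw [pvCollect, if_pos hp, hself]
  | succ g ih =>
    intro m hg
    by_cases hp : isPrimeB m = true
    · have hself := pvNextP_self m ((isPrimeB_true_iff m).mp hp)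
      rw [pvCollect, if_pos hp, hself]
    · have hip : ¬ pvIsP m := fun h => hp ((isPrimeB_true_iff m).mpr h)
      obtain ⟨he, -⟩ := pvNextP_step m hip
      rw [pvCollect, if_neg hp, ih (m + 1) (by have := pvGap_step m hip; omega), he]

theorem outerA_eq (k : Nat) : ∀ (L : List Int) (m : Int), outerA k L m = L ++ pvCollect k m := by
  induction k with
  | zero => intro L m; simp [outerA, pvCollect]
  | succ k ih =>
    intro L m
    rw [outerA]
    rw [findA_eq_nextP (2 * (m.natAbs + 2)) m (pvGap_le m), ih, pvCollect_step, List.append_assoc]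
    rfl

-- where the scan stands after collecting k primes from m (bounds B's fuel budget)
def pvEnd : Nat → Int → Int
  | 0, m => m
  | Nat.succ k, m => pvEnd k ((pvNextP m : Int) + 1)

theorem pvEnd_ge (k : Nat) : ∀ m, m ≤ pvEnd k m := by
  induction k with
  | zero => intro m; simp [pvEnd]
  | succ k ih =>
    intro m
    have h1 := pvNextP_ge m
    have h2 := ih ((pvNextP m : Int) + 1)
    simp only [pvEnd]
    omega

theorem pvEnd_le (k : Nat) : ∀ m, pvEnd k m ≤ 2 ^ k * max m 2 := by
  induction k with
  | zero => intro m; simp only [pvEnd, pow_zero, one_mul]; exact le_max_left m 2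
  | succ k ih =>
    intro m
    have h1 : pvEnd (Nat.succ k) m = pvEnd k ((pvNextP m : Int) + 1) := rfl
    have h2 := ih ((pvNextP m : Int) + 1)
    have h3 : max ((pvNextP m : Int) + 1) 2 ≤ 2 * max m 2 := by
      have := pvNextP_le_two_mul m
      have h4 := le_max_right m 2
      rcases max_cases ((pvNextP m : Int) + 1) 2 with ⟨he, -⟩ | ⟨he, -⟩ <;> omega
    have h5 : (2:Int) ^ k * max ((pvNextP m : Int) + 1) 2 ≤ 2 ^ k * (2 * max m 2) :=
      mul_le_mul_of_nonneg_left h3 (by positivity)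
    calc pvEnd (Nat.succ k) m ≤ 2 ^ k * max ((pvNextP m : Int) + 1) 2 := h1 ▸ h2
      _ ≤ 2 ^ k * (2 * max m 2) := h5
      _ = 2 ^ (k + 1) * max m 2 := by ring

theorem loopB_eq : ∀ (j : Nat) (L : List Int), L.length ≤ 10 → 10 - L.length = j →
    ∀ (fuel : Nat) (m : Int), (pvEnd j m - m).toNat ≤ fuel →
    loopB fuel m L = L ++ pvCollect j m := by
  intro j
  induction j with
  | zero =>
    intro L hle hj fuel m hfu
    match fuel with
    | 0 => rw [loopB, pvCollect, List.append_nil]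
    | Nat.succ f => rw [loopB, if_neg (by omega), pvCollect, List.append_nil]
  | succ j ihj =>
    intro L hle hj fuel m
    induction fuel generalizing m with
    | zero =>
      intro hfu
      exfalso
      have h1 := pvNextP_ge m
      have h2 := pvEnd_ge j ((pvNextP m : Int) + 1)
      have h3 : pvEnd (j + 1) m = pvEnd j ((pvNextP m : Int) + 1) := rfl
      omega
    | succ f ihf =>
      intro hfu
      rw [loopB, if_pos (by omega)]
      have hend : pvEnd (j + 1) m = pvEnd j ((pvNextP m : Int) + 1) := rfl
      by_cases hp : isPrimeB m = true
      · have hself := pvNextP_self m ((isPrimeB_true_iff m).mp hp)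
        rw [hend, hself] at hfu
        rw [if_pos hp,
          ihj (L ++ [m]) (by simp; omega) (by simp; omega) f (m + 1)
            (by have := pvEnd_ge j (m + 1); omega),
          pvCollect, if_pos hp]
        simp
      · have hip : ¬ pvIsP m := fun h => hp ((isPrimeB_true_iff m).mpr h)
        obtain ⟨he, hge⟩ := pvNextP_step m hip
        have hend1 : pvEnd (j + 1) (m + 1) = pvEnd (j + 1) m := by
          rw [hend, show pvEnd (j + 1) (m + 1) = pvEnd j ((pvNextP (m + 1) : Int) + 1) from rfl, he]
        rw [hend] at hfu
        have h2 := pvEnd_ge j ((pvNextP m : Int) + 1)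
        rw [if_neg hp,
          ihf (m + 1) (by rw [hend1, hend]; omega)]
        conv_rhs => rw [pvCollect, if_neg hp]

-- ===== VERDICT (by name: the statement is the Claim_ definition above) =====
theorem next_ten_primes_spec : Claim_equal_next_ten_primes := by
  intro n _
  unfold Spec_next_ten_primes next_ten_primes next_ten_primes_alt
  have hfuel : (pvEnd 10 n - n).toNat ≤ 1024 * (n.natAbs + 2) := by
    have h1 := pvEnd_le 10 n
    have hpow : (2:Int) ^ 10 = 1024 := by norm_num
    rw [hpow] at h1
    have h2 : max n 2 ≤ (n.natAbs : Int) + 2 := by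
      rcases le_total n 2 with h | h
      · rw [max_eq_right h]; omega
      · rw [max_eq_left h]; omega
    have h3 : (1024:Int) * max n 2 ≤ 1024 * ((n.natAbs : Int) + 2) :=
      mul_le_mul_of_nonneg_left h2 (by norm_num)
    omega
  rw [outerA_eq, loopB_eq 10 [] (by simp) (by simp) (1024 * (n.natAbs + 2)) n hfuel]
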